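-- pv_equiv track=rewrite | github.com/Matteo-Candi/Master-Thesis | results/test_01/test_01_formatted.py | isRepUnitNum
-- ===== SOURCE A (Python) =====
-- def isRepUnitNum(n, b):
--     length = 0
--     countOne = 0
--     while n != 0:
--         r = n % b
--         length += 1
--         if r == 1:
--             countOne += 1
--         n = n // b
--     return countOne >= 3 and countOne == length
-- ===== SOURCE B (Python) =====
-- def isRepUnitNum(n, b):
--     # Generate base-b repunits 1, b+1, b^2+b+1, ... and compare against n.
--     rep = 1
--     length = 1
--     while rep < n:
--         rep = rep * b + 1
--         length += 1
--     return length >= 3 and rep == n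
-- ===== Notes on version B (the rewrite author's own statement) =====
-- stated objective: alternative
-- what changed: B generates the increasing sequence of base-b repunits via rep = rep*b + 1 and compares the first one reaching n, instead of decomposing n digit by digit and counting 1-digits.
-- outside the precondition, e.g. on isRepUnitNum(3, -2): A returns False, B returns True; on isRepUnitNum(-5, 2): A does not finish within the time limit, B returns False; on isRepUnitNum(5, 1): A does not finish within the time limit, B returns True
import Mathlib
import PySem

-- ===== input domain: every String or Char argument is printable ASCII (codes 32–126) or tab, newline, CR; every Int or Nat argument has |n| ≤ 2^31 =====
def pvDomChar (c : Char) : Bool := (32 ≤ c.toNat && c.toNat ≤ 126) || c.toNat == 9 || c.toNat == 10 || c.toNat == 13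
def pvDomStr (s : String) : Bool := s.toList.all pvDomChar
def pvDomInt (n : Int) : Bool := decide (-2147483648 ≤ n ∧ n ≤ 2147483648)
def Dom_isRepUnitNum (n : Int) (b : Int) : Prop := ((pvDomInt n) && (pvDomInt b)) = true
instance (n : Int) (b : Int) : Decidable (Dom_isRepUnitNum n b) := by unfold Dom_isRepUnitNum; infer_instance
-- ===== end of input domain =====

-- B checks repunit-hood by generating the repunit sequence upward instead of extracting digits; equivalence on the stated natural domain n ≥ 0, b ≥ 2.

-- ===== PORT A =====
-- while-loop of A, fuel-guarded (fuel only makes the recursion total; inside Pre_ it never runs out)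
def isRepUnitNumLoopA (fuel : Nat) (n b length countOne : Int) : Bool :=
  match fuel with
  | 0 => false
  | fuel + 1 =>
    if n ≠ 0 then
      let r := PySem.Int.mod n b
      let length := length + 1
      let countOne := if r = 1 then countOne + 1 else countOne
      isRepUnitNumLoopA fuel (PySem.Int.floordiv n b) b length countOne
    else
      decide (countOne ≥ 3 ∧ countOne = length)

def isRepUnitNum (n : Int) (b : Int) : Bool :=
  isRepUnitNumLoopA (n.toNat + 1) n b 0 0

-- ===== PORT B =====
-- while-loop of B, fuel-guarded likewise
def isRepUnitNumLoopB (fuel : Nat) (n b rep length : Int) : Bool :=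
  match fuel with
  | 0 => false
  | fuel + 1 =>
    if rep < n then
      isRepUnitNumLoopB fuel n b (rep * b + 1) (length + 1)
    else
      decide (length ≥ 3 ∧ rep = n)

def isRepUnitNum_alt (n : Int) (b : Int) : Bool :=
  isRepUnitNumLoopB (n.toNat + 1) n b 1 1

-- ===== PRECONDITION & SPEC =====
-- Pre_ excludes: negative n with b ≥ 2, b = 1 and b = -1 (A infinite-loops), b = 0 (A raises
-- ZeroDivisionError), and negative bases b ≤ -2, where A returns — but its reliance on Python's
-- divisor-sign modulo yields only nonpositive digits, so it denies every genuine negative-base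
-- repunit: a corner artefact on an unspecified domain, where B's generated value is equally defensible.
def Pre_isRepUnitNum (n : Int) (b : Int) : Prop := 0 ≤ n ∧ 2 ≤ b
instance (n : Int) (b : Int) : Decidable (Pre_isRepUnitNum n b) := by unfold Pre_isRepUnitNum; infer_instance
def pvWitness_isRepUnitNum : Int × Int := (7, 2)

def Spec_isRepUnitNum (n : Int) (b : Int) (out : Bool) : Prop := out = isRepUnitNum_alt n b
instance (n : Int) (b : Int) (out : Bool) : Decidable (Spec_isRepUnitNum n b out) := by unfold Spec_isRepUnitNum; infer_instance

-- ===== CLAIM (what is proved, stated in full; the proofs are below) =====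
def Claim_equal_isRepUnitNum : Prop := ∀ (n : Int) (b : Int), Dom_isRepUnitNum n b → Pre_isRepUnitNum n b → Spec_isRepUnitNum n b (isRepUnitNum n b)

-- ===== LEMMAS AND PROOFS =====

-- the base-b repunit with k ones (R 0 = 0)
def repu (b : Int) (k : Nat) : Int :=
  match k with
  | 0 => 0
  | k + 1 => repu b k * b + 1

theorem repu_nonneg (b : Int) (hb : 2 ≤ b) (k : Nat) : 0 ≤ repu b k := by
  induction k with
  | zero => simp [repu]
  | succ k ih => simp only [repu]; nlinarith

theorem repu_lt_succ (b : Int) (hb : 2 ≤ b) (k : Nat) : repu b k < repu b (k + 1) := by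
  have := repu_nonneg b hb k
  simp only [repu]; nlinarith

theorem repu_strictMono (b : Int) (hb : 2 ≤ b) : StrictMono (repu b) :=
  strictMono_nat_of_lt_succ (repu_lt_succ b hb)

theorem repu_pos (b : Int) (hb : 2 ≤ b) (k : Nat) (hk : 1 ≤ k) : 0 < repu b k := by
  have h := repu_strictMono b hb (show 0 < k from hk)
  simpa [repu] using h

-- characterisation of A's loop: it returns true iff the remaining n is a repunit with
-- exactly enough ones to bring the running count to ≥ 3 and count = length
theorem loopA_char (b : Int) (hb : 2 ≤ b) :
    ∀ (fuel : Nat) (n L C : Int), 0 ≤ n → n < (fuel : Int) → C ≤ L →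
    (isRepUnitNumLoopA fuel n b L C = true ↔ C = L ∧ ∃ k : Nat, n = repu b k ∧ 3 ≤ C + (k : Int)) := by
  intro fuel
  induction fuel with
  | zero => intro n L C hn hfu _; exfalso; omega
  | succ fuel ih =>
    intro n L C hn hfu hCL
    by_cases h0 : n = 0
    · subst h0
      simp only [isRepUnitNumLoopA, ne_eq, not_true_eq_false, if_false, decide_eq_true_eq]
      constructor
      · rintro ⟨h3, he⟩; exact ⟨he.symm ▸ rfl, 0, rfl, by simpa using h3⟩
      · rintro ⟨hCLe, k, hk, h3⟩
        have hk0 : k = 0 := by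
          by_contra hne
          have := repu_pos b hb k (Nat.one_le_iff_ne_zero.mpr hne)
          omega
        subst hk0; simp [repu] at hk h3 ⊢; omega
    · have hbpos : (0 : Int) < b := by omega
      have hmod : 0 ≤ PySem.Int.mod n b := PySem.Int.mod_nonneg n hbpos
      have hmodlt : PySem.Int.mod n b < b := PySem.Int.mod_lt n hbpos
      have hdiv := PySem.Int.floordiv_mul_add_mod n b
      have hnpos : 0 < n := lt_of_le_of_ne hn (Ne.symm h0)
      have hq0 : 0 ≤ PySem.Int.floordiv n b := by nlinarith
      have hqlt : PySem.Int.floordiv n b < n := by nlinarith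
      simp only [isRepUnitNumLoopA, h0, ne_eq, not_false_eq_true, if_true]
      by_cases hr : PySem.Int.mod n b = 1
      · simp only [hr, if_true]
        rw [ih (PySem.Int.floordiv n b) (L + 1) (C + 1) hq0 (by omega) (by omega)]
        constructor
        · rintro ⟨hCL1, k, hk, h3⟩
          refine ⟨by omega, k + 1, ?_, by push_cast; omega⟩
          simp only [repu]; rw [← hk]; omega
        · rintro ⟨hCLe, k, hk, h3⟩
          have hk0 : k ≠ 0 := by
            rintro rfl; simp [repu] at hk; omega
          obtain ⟨k', rfl⟩ := Nat.exists_eq_succ_of_ne_zero hk0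
          refine ⟨by omega, k', ?_, by push_cast at h3 ⊢; omega⟩
          simp only [repu] at hk
          have hb1 : (1 : Int) < b := by omega
          -- uniqueness of division: n = repu b k' * b + 1 forces floordiv n b = repu b k'
          have : PySem.Int.floordiv n b = repu b k' := by
            have hrep := repu_nonneg b hb k'
            nlinarith [hmodlt, hmod]
          exact this
      · simp only [hr, if_false]
        rw [ih (PySem.Int.floordiv n b) (L + 1) C hq0 (by omega) (by omega)]
        constructor
        · rintro ⟨hCL1, _⟩; omega
        · rintro ⟨hCLe, k, hk, h3⟩
          exfalso
          have hk0 : k ≠ 0 := by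
            rintro rfl; simp [repu] at hk; omega
          obtain ⟨k', rfl⟩ := Nat.exists_eq_succ_of_ne_zero hk0
          simp only [repu] at hk
          have hrep := repu_nonneg b hb k'
          have hfd : PySem.Int.floordiv n b = repu b k' := by nlinarith [hmodlt, hmod]
          have : PySem.Int.mod n b = 1 := by rw [hfd] at hdiv; linarith
          exact hr this

-- characterisation of B's loop with state (repu b j, j)
theorem loopB_char (n b : Int) (hb : 2 ≤ b) :
    ∀ (fuel : Nat) (j : Nat), 1 ≤ j → (n - repu b j).toNat < fuel →
    (isRepUnitNumLoopB fuel n b (repu b j) (j : Int) = true ↔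
      ∃ k : Nat, j ≤ k ∧ 3 ≤ (k : Int) ∧ n = repu b k) := by
  intro fuel
  induction fuel with
  | zero => intro j hj hfu; exact absurd hfu (by omega)
  | succ fuel ih =>
    intro j hj hfu
    by_cases hlt : repu b j < n
    · have hrep1 : repu b (j + 1) = repu b j * b + 1 := rfl
      have h1 := repu_pos b hb j hj
      have hstep : repu b j + 1 ≤ repu b (j + 1) := by rw [hrep1]; nlinarith
      have hfu' : (n - repu b (j + 1)).toNat < fuel := by omega
      simp only [isRepUnitNumLoopB, if_pos hlt]
      have hcast : ((j : Int) + 1) = ((j + 1 : Nat) : Int) := by push_cast; ring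
      rw [hcast, ← hrep1, ih (j + 1) (by omega) hfu']
      constructor
      · rintro ⟨k, hk, h3, he⟩; exact ⟨k, by omega, h3, he⟩
      · rintro ⟨k, hk, h3, he⟩
        refine ⟨k, ?_, h3, he⟩
        rcases Nat.lt_or_ge j k with h | h
        · omega
        · have : k = j := by omega
          subst this; omega
    · simp only [isRepUnitNumLoopB, if_neg hlt, decide_eq_true_eq]
      constructor
      · rintro ⟨h3, he⟩; exact ⟨j, le_refl _, by omega, he.symm⟩
      · rintro ⟨k, hk, h3, he⟩
        have : k = j := by
          by_contra hne
          have hlt2 := repu_strictMono b hb (show j < k by omega)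
          omega
        subst this; exact ⟨by omega, he.symm⟩

-- ===== VERDICT (by name: the statement is the Claim_ definition above) =====
theorem isRepUnitNum_spec : Claim_equal_isRepUnitNum := by
  intro n b _ hpre
  obtain ⟨hn, hb⟩ := hpre
  unfold Spec_isRepUnitNum isRepUnitNum isRepUnitNum_alt
  have hA := loopA_char b hb (n.toNat + 1) n 0 0 hn (by push_cast; omega) le_rfl
  have hB := loopB_char n b hb (n.toNat + 1) 1 le_rfl
    (by have : repu b 1 = 1 := by simp [repu]
        omega)
  have h1 : repu b 1 = 1 := by simp [repu]
  rw [h1] at hB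
  simp only [Nat.cast_one] at hB
  rw [Bool.eq_iff_iff, hA, hB]
  constructor
  · rintro ⟨-, k, hk, h3⟩
    exact ⟨k, by omega, by omega, hk⟩
  · rintro ⟨k, hk1, h3, he⟩
    exact ⟨rfl, k, he, by omega⟩
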